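-- pv_equiv track=rewrite | github.com/DianDian798/TestCaseReduction | TestCaseReduction.py | getNextTestCaseSetId
-- ===== SOURCE A (Python) =====
-- def getNextTestCaseSetId(initialTestCaseSetId, resultOftestCase):
--     result = []
--     size = len(resultOftestCase)
--     for index in range(0, size):
--         if index not in initialTestCaseSetId:
--             result.append(index)
--         else:
--             pass
--     return result
-- ===== SOURCE B (Python) =====
-- def getNextTestCaseSetId(initialTestCaseSetId, resultOftestCase):
--     return sorted(set(range(len(resultOftestCase))) - set(initialTestCaseSetId))
-- ===== Notes on version B (the rewrite author's own statement) =====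
-- stated objective: faster
-- what changed: The index loop with a linear 'index not in list' membership test per iteration is replaced by a single set difference set(range(size)) - set(ids) followed by sorted(), removing the inner scan.
import Mathlib
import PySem

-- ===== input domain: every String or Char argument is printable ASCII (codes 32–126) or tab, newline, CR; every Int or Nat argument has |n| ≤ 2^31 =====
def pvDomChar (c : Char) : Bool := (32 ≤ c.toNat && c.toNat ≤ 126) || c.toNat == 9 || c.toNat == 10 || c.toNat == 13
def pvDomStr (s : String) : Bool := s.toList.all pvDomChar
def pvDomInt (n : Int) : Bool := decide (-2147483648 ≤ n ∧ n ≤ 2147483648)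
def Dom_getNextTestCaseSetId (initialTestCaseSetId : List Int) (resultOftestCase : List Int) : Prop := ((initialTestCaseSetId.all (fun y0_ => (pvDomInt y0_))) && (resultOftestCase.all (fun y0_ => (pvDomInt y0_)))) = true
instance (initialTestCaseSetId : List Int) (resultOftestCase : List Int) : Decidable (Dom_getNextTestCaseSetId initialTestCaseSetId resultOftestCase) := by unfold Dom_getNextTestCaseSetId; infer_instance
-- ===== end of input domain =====

-- B: replaces the per-index linear membership scan with one set difference plus a sort (alternative algorithm).
-- ===== PORT A =====
-- for index in range(0, size): if index not in initialTestCaseSetId: result.append(index)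
def getNextTestCaseSetId (initialTestCaseSetId : List Int) (resultOftestCase : List Int) : List Int :=
  (PySem.List.pyRange 0 (resultOftestCase.length : Int) 1).foldl
    (fun result index => if initialTestCaseSetId.contains index then result else result ++ [index]) []

-- ===== PORT B =====
-- sorted(set(range(len(resultOftestCase))) - set(initialTestCaseSetId))
def getNextTestCaseSetId_alt (initialTestCaseSetId : List Int) (resultOftestCase : List Int) : List Int :=
  PySem.List.sorted
    (PySem.Set.diff (PySem.Set.ofList (PySem.List.pyRange 0 (resultOftestCase.length : Int) 1))
                    (PySem.Set.ofList initialTestCaseSetId))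
    (fun x => x) false

-- ===== PRECONDITION & SPEC =====
def Spec_getNextTestCaseSetId (initialTestCaseSetId : List Int) (resultOftestCase : List Int) (out : List Int) : Prop := out = getNextTestCaseSetId_alt initialTestCaseSetId resultOftestCase
instance (initialTestCaseSetId : List Int) (resultOftestCase : List Int) (out : List Int) : Decidable (Spec_getNextTestCaseSetId initialTestCaseSetId resultOftestCase out) := by unfold Spec_getNextTestCaseSetId; infer_instance

-- ===== CLAIM (what is proved, stated in full; the proofs are below) =====
def Claim_equal_getNextTestCaseSetId : Prop := ∀ (initialTestCaseSetId : List Int) (resultOftestCase : List Int), Dom_getNextTestCaseSetId initialTestCaseSetId resultOftestCase → Spec_getNextTestCaseSetId initialTestCaseSetId resultOftestCase (getNextTestCaseSetId initialTestCaseSetId resultOftestCase)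

-- ===== LEMMAS AND PROOFS =====

-- ===== VERDICT (by name: the statement is the Claim_ definition above) =====
-- A's loop is a filter of the index range
lemma portA_eq_filter (a : List Int) (r : List Int) :
    getNextTestCaseSetId a r
      = (PySem.List.pyRange 0 (r.length : Int) 1).filter (fun i => !a.contains i) := by
  unfold getNextTestCaseSetId
  have hfun : (fun (result : List Int) (index : Int) =>
      if a.contains index then result else result ++ [index])
      = (fun result index => if (!a.contains index) then result ++ [index] else result) := by
    funext result index
    simp
  rw [hfun]
  simpa using PySem.List.foldl_append_if (fun i : Int => !a.contains i) (fun i => i)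
    (PySem.List.pyRange 0 (r.length : Int) 1) []

-- B's set difference is the same filter, and sorting the already-increasing result is the identity
lemma portB_eq_filter (a : List Int) (r : List Int) :
    getNextTestCaseSetId_alt a r
      = (PySem.List.pyRange 0 (r.length : Int) 1).filter (fun i => !a.contains i) := by
  unfold getNextTestCaseSetId_alt
  rw [PySem.Set.ofList_eq_self_of_nodup _ (PySem.List.nodup_pyRange_one 0 (r.length : Int))]
  have hc : (fun i : Int => !(PySem.Set.ofList a).contains i) = (fun i => !a.contains i) := by
    funext i
    by_cases h : i ∈ a
    · simp [(PySem.Set.mem_ofList a i).mpr h, h]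
    · have : i ∉ PySem.Set.ofList a := fun hm => h ((PySem.Set.mem_ofList a i).mp hm)
      simp [h, this]
  show PySem.List.sorted ((PySem.List.pyRange 0 (r.length : Int) 1).filter
      (fun i => !(PySem.Set.ofList a).contains i)) (fun x => x) false = _
  rw [hc]
  exact PySem.List.sorted_eq_self_of_pairwise _ _
    (((PySem.List.pairwise_lt_pyRange_one 0 (r.length : Int)).sublist
      List.filter_sublist).imp le_of_lt)

-- ===== VERDICT =====
theorem getNextTestCaseSetId_spec : Claim_equal_getNextTestCaseSetId := by
  intro a r _
  unfold Spec_getNextTestCaseSetId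
  rw [portA_eq_filter, portB_eq_filter]
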